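-- pv_equiv track=rewrite | github.com/RedLynx101/asteria-command-station | asteria/daemon/runtime.py | _split_hosts
-- ===== SOURCE A (Python) =====
-- from typing import Any
--
-- def _split_hosts(raw: Any) -> list[str]:
--     if raw is None:
--         return []
--     if isinstance(raw, (list, tuple)):
--         values = raw
--     else:
--         values = str(raw).split(",")
--     hosts: list[str] = []
--     seen: set[str] = set()
--     for value in values:
--         host = str(value).strip()
--         if not host or host in seen:
--             continue
--         hosts.append(host)
--         seen.add(host)
--     return hosts
-- ===== SOURCE B (Python) =====
-- def _split_hosts(raw):
--     if raw is None:
--         return []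
--     if isinstance(raw, (list, tuple)):
--         values = raw
--     else:
--         values = str(raw).split(",")
--     cleaned = [h for h in (str(v).strip() for v in values) if h]
--
--     def dedup(xs):
--         # first-occurrence dedup by recursion: keep the head, drop every later
--         # copy of it from the rest, recurse on what remains (no seen set at all)
--         if not xs:
--             return []
--         head = xs[0]
--         return [head] + dedup([x for x in xs[1:] if x != head])
--
--     return dedup(cleaned)
-- ===== Notes on version B (the rewrite author's own statement) =====
-- stated objective: alternative
-- what changed: Replaces A's single pass with a seen-set membership branch by a two-stage pipeline: strip/filter first, then a recursive quicksort-style dedup that keeps the head and filters all later copies of it out of the remainder before recursing (no seen set, no membership test against accumulated state).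
import Mathlib
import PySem

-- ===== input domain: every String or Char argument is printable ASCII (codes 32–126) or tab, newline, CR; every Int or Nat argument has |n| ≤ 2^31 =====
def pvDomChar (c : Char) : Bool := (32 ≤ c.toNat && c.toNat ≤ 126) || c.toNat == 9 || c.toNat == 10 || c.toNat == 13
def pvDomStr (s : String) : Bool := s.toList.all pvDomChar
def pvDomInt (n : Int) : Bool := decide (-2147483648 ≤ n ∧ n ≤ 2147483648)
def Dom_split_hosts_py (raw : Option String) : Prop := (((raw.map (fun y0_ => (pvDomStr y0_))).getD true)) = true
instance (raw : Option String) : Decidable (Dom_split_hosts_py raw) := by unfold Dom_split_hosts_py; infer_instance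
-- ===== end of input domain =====

-- B replaces A's seen-set single pass by strip/filter followed by a recursive
-- head-keep/filter-out dedup; alternative decomposition, same results.

-- ===== PORT A =====
def split_hosts_py (raw : Option String) : List String :=
  match raw with
  | none => []
  | some s =>
    let values := ((PySem.Str.split? s ",").getD [])
    let res := values.foldl (fun (st : List String × PySem.Set String) value =>
      let host := PySem.Str.strip value
      if host = "" ∨ PySem.Set.contains st.2 host = true then st
      else (st.1 ++ [host], PySem.Set.add st.2 host)) ([], PySem.Set.empty)
    res.1

-- ===== PORT B =====
-- recursive dedup: keep the head, remove its later copies, recurse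
def dedupRecB : List String → List String
  | [] => []
  | x :: t => x :: dedupRecB (t.filter (fun y => y ≠ x))
termination_by xs => xs.length
decreasing_by
  simpa using Nat.lt_succ_of_le (le_trans (List.length_filter_le _ _) (by simp))

def split_hosts_py_alt (raw : Option String) : List String :=
  match raw with
  | none => []
  | some s =>
    let values := ((PySem.Str.split? s ",").getD [])
    let cleaned := (values.map PySem.Str.strip).filter (fun h => h ≠ "")
    dedupRecB cleaned

-- ===== PRECONDITION & SPEC =====
def Spec_split_hosts_py (raw : Option String) (out : List String) : Prop := out = split_hosts_py_alt raw
instance (raw : Option String) (out : List String) : Decidable (Spec_split_hosts_py raw out) := by unfold Spec_split_hosts_py; infer_instance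

-- ===== CLAIM =====
def Claim_equal_split_hosts_py : Prop := ∀ (raw : Option String), Dom_split_hosts_py raw → Spec_split_hosts_py raw (split_hosts_py raw)

-- ===== LEMMAS AND PROOFS =====

-- A's loop from state (acc, acc) computes the Set.add-fold of the stripped, nonempty values.
theorem split_hosts_loop_eq (l : List String) (acc : PySem.Set String) :
    (l.foldl (fun (st : List String × PySem.Set String) value =>
      let host := PySem.Str.strip value
      if host = "" ∨ PySem.Set.contains st.2 host = true then st
      else (st.1 ++ [host], PySem.Set.add st.2 host)) (acc, acc)).1
    = ((l.map PySem.Str.strip).filter (fun h => h ≠ "")).foldl PySem.Set.add acc := by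
  induction l generalizing acc with
  | nil => rfl
  | cons v t ih =>
    simp only [List.foldl_cons, List.map_cons, List.filter_cons]
    by_cases h0 : PySem.Str.strip v = ""
    · rw [if_pos (Or.inl h0)]
      rw [show (decide (PySem.Str.strip v ≠ "")) = false from by simp [h0]]
      simp only [Bool.false_eq_true, if_false]
      exact ih acc
    · rw [show (decide (PySem.Str.strip v ≠ "")) = true from by simp [h0]]
      simp only [if_true]
      by_cases hc : PySem.Str.strip v ∈ acc
      · have hcb : PySem.Set.contains acc (PySem.Str.strip v) = true := by
          simpa [PySem.Set.contains] using hc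
        have hadd : PySem.Set.add acc (PySem.Str.strip v) = acc := by
          simp [PySem.Set.add, hc]
        rw [if_pos (Or.inr hcb), List.foldl_cons, hadd]
        exact ih acc
      · have hcb : ¬ (PySem.Str.strip v = "" ∨ PySem.Set.contains acc (PySem.Str.strip v) = true) := by
          simp [h0, PySem.Set.contains, hc]
        have hadd : PySem.Set.add acc (PySem.Str.strip v) = acc ++ [PySem.Str.strip v] := by
          simp [PySem.Set.add, hc]
        rw [if_neg hcb, List.foldl_cons, hadd]
        exact ih (acc ++ [PySem.Str.strip v])

-- dropping elements already in the accumulator does not change a Set.add-fold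
theorem foldl_add_filter_mem (l : List String) (acc : PySem.Set String) (x : String)
    (hx : x ∈ acc) :
    (l.filter (fun y => y ≠ x)).foldl PySem.Set.add acc = l.foldl PySem.Set.add acc := by
  induction l generalizing acc with
  | nil => rfl
  | cons a t ih =>
    by_cases hax : a = x
    · subst hax
      have hA : PySem.Set.add acc a = acc := by simp [PySem.Set.add, PySem.Set.contains, hx]
      have hf : List.filter (fun y => y ≠ a) (a :: t) = List.filter (fun y => y ≠ a) t := by simp
      rw [hf, ih acc hx, List.foldl_cons, hA]
    · simp only [List.filter_cons, show (decide (a ≠ x)) = true from by simp [hax],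
        if_true, List.foldl_cons]
      have hx' : x ∈ PySem.Set.add acc a := by
        simp [PySem.Set.add]; split_ifs <;> simp [hx]
      exact ih _ hx'

-- an element absent from l can be pulled out in front of a Set.add-fold
theorem foldl_add_cons_notmem (l : List String) (acc : List String) (x : String)
    (hx : ∀ y ∈ l, y ≠ x) :
    l.foldl PySem.Set.add (x :: acc) = x :: l.foldl PySem.Set.add acc := by
  induction l generalizing acc with
  | nil => rfl
  | cons a t ih =>
    have hax : a ≠ x := hx a (List.mem_cons_self ..)
    have hstep : PySem.Set.add (x :: acc) a = x :: PySem.Set.add acc a := by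
      simp [PySem.Set.add, PySem.Set.contains, hax]
      split_ifs <;> simp
    simp only [List.foldl_cons, hstep]
    exact ih _ (fun y hy => hx y (List.mem_cons_of_mem _ hy))

-- B's recursive dedup equals the Set.add-fold from the empty set (fuelled induction on length)
theorem dedupRecB_eq_foldl_aux : ∀ (n : Nat) (l : List String), l.length ≤ n →
    dedupRecB l = l.foldl PySem.Set.add [] := by
  intro n
  induction n with
  | zero =>
    intro l h
    have : l = [] := List.eq_nil_of_length_eq_zero (Nat.le_zero.mp h)
    subst this; simp [dedupRecB]
  | succ n ihn =>
    intro l h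
    match l with
    | [] => simp [dedupRecB]
    | x :: t =>
    have ht : t.length ≤ n := Nat.lt_succ_iff.mp (by simpa using h)
    have ih := ihn (t.filter (fun y => y ≠ x)) (le_trans (List.length_filter_le _ _) ht)
    have hnot : ∀ y ∈ t.filter (fun y => y ≠ x), y ≠ x := by
      intro y hy; simpa using (List.of_mem_filter hy)
    have hemp : PySem.Set.add ([] : List String) x = [x] := by
      simp [PySem.Set.add, PySem.Set.contains]
    calc dedupRecB (x :: t)
        = x :: dedupRecB (t.filter (fun y => y ≠ x)) := by rw [dedupRecB]
      _ = x :: (t.filter (fun y => y ≠ x)).foldl PySem.Set.add [] := by rw [ih]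
      _ = (t.filter (fun y => y ≠ x)).foldl PySem.Set.add [x] := by
            rw [show ([x] : List String) = x :: [] from rfl,
              foldl_add_cons_notmem _ _ _ hnot]
      _ = t.foldl PySem.Set.add [x] := foldl_add_filter_mem _ _ _ (by simp)
      _ = (x :: t).foldl PySem.Set.add [] := by simp [List.foldl_cons]

theorem dedupRecB_eq_foldl (l : List String) :
    dedupRecB l = l.foldl PySem.Set.add [] :=
  dedupRecB_eq_foldl_aux l.length l le_rfl

-- ===== VERDICT =====
theorem split_hosts_py_spec : Claim_equal_split_hosts_py := by
  intro raw _
  unfold Spec_split_hosts_py split_hosts_py split_hosts_py_alt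
  cases raw with
  | none => rfl
  | some s =>
    simp only []
    rw [show (PySem.Set.empty : PySem.Set String) = ([] : List String) from rfl] at *
    rw [split_hosts_loop_eq, dedupRecB_eq_foldl]
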